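-- pv_equiv track=rewrite | github.com/ngrnara/video-crypt-decrypt-hybrid-AES-Myszkowski | crypto_hybrid.py | myszkowski_decrypt
-- ===== SOURCE A (Python) =====
-- def _keyword_order(keyword: str):
--     """
--     Menghasilkan urutan peringkat numerik untuk setiap karakter dalam keyword
--     berdasarkan urutan abjad uniknya. Huruf yang sama mendapat peringkat yang sama.
--     Contoh: "BALLOON" -> [2, 1, 3, 3, 4, 4, 5] (A=1, B=2, L=3, N=4, O=5)
--     """
--     chars = list(keyword)
--     unique_sorted = sorted(set(chars))
--     rank_map = {c: i + 1 for i, c in enumerate(unique_sorted)} # Peringkat dimulai dari 1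
--     return [rank_map[c] for c in chars]
--
-- def myszkowski_decrypt(ciphertext: str, keyword: str) -> str:
--     """
--     Mendekripsi ciphertext Myszkowski (Versi Revisi Perhitungan Kolom).
--     Tujuannya adalah merekonstruksi hex string kunci AES asli (64 karakter).
--     """
--     if not keyword:
--         raise ValueError("Keyword diperlukan untuk Myszkowski")
--
--     cols = len(keyword) # Jumlah kolom = panjang keyword
--     original_plaintext_len = 64 # Kunci AES 32 byte = 64 hex karakter
--
--     # -- REKONSTRUKSI INFORMASI GRID ENKRIPSI --
--     # Kita perlu tahu persis bagaimana grid dibuat saat enkripsi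
--
--     # Hitung jumlah baris yang digunakan saat enkripsi
--     # (panjang asli + cols - 1) // cols adalah cara cepat menghitung ceil(panjang/cols)
--     num_rows_encrypt = (original_plaintext_len + cols - 1) // cols
--
--     # Hitung total sel dalam grid enkripsi
--     grid_size_encrypt = num_rows_encrypt * cols
--
--     # Hitung berapa banyak padding '\0' yang ditambahkan di akhir saat enkripsi
--     padding_count_encrypt = grid_size_encrypt - original_plaintext_len
--
--     # -- LOGIKA DEKRIPSI (MEMBACA CIPHERTEXT SESUAI URUTAN KOLOM) --
--     ranks = _keyword_order(keyword) # Peringkat kolom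
--     idxs = list(range(cols))
--     # Urutan kolom dibaca saat enkripsi (dan harus dibaca kembali saat dekripsi)
--     idxs_sorted_by_rank = sorted(idxs, key=lambda i: (ranks[i], i))
--
--     # Tentukan panjang aktual (jumlah karakter non-padding) untuk setiap kolom
--     col_lengths_in_grid = {}
--     for c in range(cols):
--         # Awalnya, setiap kolom berisi 'num_rows_encrypt' karakter
--         length = num_rows_encrypt
--         # Jika kolom ini berada di posisi yang diisi padding di baris terakhir, kurangi panjangnya
--         # Indeks sel terakhir di kolom c adalah (num_rows_encrypt - 1) * cols + c
--         # Jika indeks ini >= panjang asli, berarti sel itu berisi padding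
--         if (num_rows_encrypt - 1) * cols + c >= original_plaintext_len:
--             length -= 1
--         col_lengths_in_grid[c] = length
--
--     # Sekarang kita tahu berapa banyak karakter yang harus dibaca dari ciphertext
--     # untuk mengisi setiap kolom sesuai urutan idxs_sorted_by_rank
--
--     parts = {} # Dictionary: {indeks_kolom_asli: [daftar karakter]}
--     ptr = 0 # Penunjuk posisi saat membaca ciphertext
--     for col_idx_in_read_order in idxs_sorted_by_rank:
--         # Ambil panjang sebenarnya dari dictionary yang sudah kita hitung
--         actual_chars_in_col = col_lengths_in_grid[col_idx_in_read_order]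
--
--         # Baca sejumlah karakter tersebut dari ciphertext
--         read_chars = list(ciphertext[ptr : ptr + actual_chars_in_col])
--         parts[col_idx_in_read_order] = read_chars
--         ptr += actual_chars_in_col
--
--     # -- REKONSTRUKSI PLAINTEXT DARI KOLOM YANG SUDAH DIISI --
--     # Buat grid kosong untuk hasil dekripsi
--     decrypted_grid = [['\0'] * cols for _ in range(num_rows_encrypt)]
--
--     # Isi grid kosong dengan karakter dari 'parts', kolom per kolom (sesuai urutan asli 0..cols-1)
--     for col_idx in range(cols):
--         chars_for_this_col = parts.get(col_idx, [])
--         for r in range(len(chars_for_this_col)):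
--             decrypted_grid[r][col_idx] = chars_for_this_col[r]
--
--     # Gabungkan karakter dari grid hasil dekripsi, baris per baris
--     plaintext_chars = []
--     for r in range(num_rows_encrypt):
--         for c in range(cols):
--             char = decrypted_grid[r][c]
--             # Hanya tambahkan jika BUKAN padding DAN belum mencapai panjang asli (64)
--             if char != '\0' and len(plaintext_chars) < original_plaintext_len:
--                  plaintext_chars.append(char)
--
--     plain = ''.join(plaintext_chars)
--
--     # Validasi Akhir (Sangat Penting)
--     if len(plain) != original_plaintext_len:
--          # Jika logika di atas benar, ini seharusnya tidak pernah terjadi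
--          # Tapi jika terjadi, ini menandakan keyword salah atau ciphertext korup
--          raise ValueError(f"Dekripsi Myszkowski gagal: Panjang hasil ({len(plain)}) tidak sama dengan panjang asli ({original_plaintext_len}). Keyword kemungkinan salah atau file rusak.")
--
--     return plain # Kembalikan hex string hasil dekripsi
-- ===== SOURCE B (Python) =====
-- def _keyword_order(keyword: str):
--     unique_sorted = sorted(set(keyword))
--     rank_map = {c: i + 1 for i, c in enumerate(unique_sorted)}
--     return [rank_map[c] for c in keyword]
--
--
-- def myszkowski_decrypt(ciphertext: str, keyword: str) -> str:
--     if not keyword: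
--         raise ValueError("Keyword diperlukan untuk Myszkowski")
--
--     cols = len(keyword)
--     original_plaintext_len = 64
--     num_rows = (original_plaintext_len + cols - 1) // cols
--
--     ranks = _keyword_order(keyword)
--     order = sorted(range(cols), key=lambda i: (ranks[i], i))
--
--     # Build the inverse permutation of the encryption read-out in one scatter
--     # pass: walking the columns in rank order, the k-th ciphertext character
--     # belongs to plaintext position r*cols + c, so src[p] is the ciphertext
--     # index holding plaintext position p.  No column lists, slices or grid.
--     src = [0] * original_plaintext_len
--     ptr = 0
--     for c in order:
--         for r in range(num_rows):
--             p = r * cols + c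
--             if p < original_plaintext_len:
--                 src[p] = ptr
--                 ptr += 1
--
--     plain = ''.join(ciphertext[i] for i in src if i < len(ciphertext))
--
--     if len(plain) != original_plaintext_len:
--         raise ValueError(
--             f"Dekripsi Myszkowski gagal: Panjang hasil ({len(plain)}) tidak sama dengan panjang asli ({original_plaintext_len}). Keyword kemungkinan salah atau file rusak."
--         )
--     return plain
-- ===== Notes on version B (the rewrite author's own statement) =====
-- stated objective: alternative
-- what changed: B never reconstructs columns or a grid: it builds the inverse permutation of the encryption read-out in one scatter pass (src[p] = ciphertext index of plaintext position p, assigning a running counter to positions r*cols+c in rank order) and then gathers the plaintext as ''.join(ciphertext[i] for i in src).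
import Mathlib
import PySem

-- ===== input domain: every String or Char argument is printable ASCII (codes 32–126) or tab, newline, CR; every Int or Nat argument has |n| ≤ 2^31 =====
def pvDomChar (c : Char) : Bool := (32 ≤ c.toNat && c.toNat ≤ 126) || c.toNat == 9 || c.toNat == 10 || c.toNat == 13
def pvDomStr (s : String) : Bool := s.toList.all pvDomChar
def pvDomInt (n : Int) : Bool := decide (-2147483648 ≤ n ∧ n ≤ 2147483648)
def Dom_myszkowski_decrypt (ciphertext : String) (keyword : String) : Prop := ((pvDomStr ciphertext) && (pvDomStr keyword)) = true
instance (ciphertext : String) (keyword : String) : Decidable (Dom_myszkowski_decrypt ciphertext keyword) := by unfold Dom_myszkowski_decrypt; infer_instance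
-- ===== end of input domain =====

-- B replaces A's column reconstruction (parts dict + 2D grid + row-major skip read) by a single
-- scatter pass building the inverse permutation src (src[p] = ciphertext index of plaintext
-- position p) and one gather join ciphertext[src[p]] (objective: alternative).

-- the padding sentinel '\0'
def pvNul : Char := Char.ofNat 0

-- shared helper `_keyword_order` (appears verbatim in both Python sources)
def keywordOrder (keyword : List Char) : List Nat :=
  let chars := keyword
  let uniqueSorted := PySem.List.sorted (PySem.Set.ofList chars) (fun c => c) false
  -- rank_map = {c: i + 1 for i, c in enumerate(unique_sorted)}
  let rankMap : PySem.Dict Char Nat :=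
    (PySem.List.enumerate uniqueSorted 0).foldl (fun d p => d.insert p.2 (p.1.toNat + 1)) PySem.Dict.empty
  -- rank_map[c]: every c of the keyword is a key of rank_map, so the lookup never raises
  chars.map (fun c => rankMap.getD c 0)

-- ===== PORT A =====
-- `if not keyword: raise ValueError` and the final length re-check raise ValueError; Pre_ excludes exactly those inputs
def myszkowski_decrypt (ciphertext : String) (keyword : String) : String :=
  let ct := ciphertext.toList
  let cols := keyword.toList.length
  let originalLen := 64
  let numRows := (originalLen + cols - 1) / cols
  let ranks := keywordOrder keyword.toList
  let idxsSorted := PySem.List.sorted2 (List.range cols) (fun i => ranks.getD i 0) (fun i => i) false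
  let colLengths : PySem.Dict Nat Nat :=
    (List.range cols).foldl (fun d c =>
      d.insert c (if originalLen ≤ (numRows - 1) * cols + c then numRows - 1 else numRows))
      PySem.Dict.empty
  -- parts/ptr loop: read each column's characters from the ciphertext in rank order
  let partsPtr : PySem.Dict Nat (List Char) × Nat :=
    idxsSorted.foldl (fun st c =>
      let n := colLengths.getD c 0
      (st.1.insert c (PySem.List.slice ct (some (st.2 : Int)) (some ((st.2 : Int) + (n : Int)))),
       st.2 + n))
      (PySem.Dict.empty, 0)
  let parts := partsPtr.1
  let grid0 : List (List Char) := List.replicate numRows (List.replicate cols pvNul)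
  -- fill the empty grid column by column (the Python's grid indices are always in range)
  let grid : List (List Char) :=
    (List.range cols).foldl (fun g c =>
      let chars := parts.getD c []
      (List.range chars.length).foldl (fun g r =>
        g.set r ((g.getD r []).set c (chars.getD r pvNul))) g)
      grid0
  -- join the grid row by row, skipping '\0' cells, capped at 64 characters
  let ptChars : List Char :=
    (List.range numRows).foldl (fun acc r =>
      (List.range cols).foldl (fun acc c =>
        let ch := (grid.getD r []).getD c pvNul
        if ch ≠ pvNul ∧ acc.length < originalLen then acc ++ [ch] else acc) acc)
      []
  String.ofList ptChars

-- ===== PORT B =====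
-- same raising branches as A (empty keyword, final length check); Pre_ excludes exactly those inputs
def myszkowski_decrypt_alt (ciphertext : String) (keyword : String) : String :=
  let ct := ciphertext.toList
  let cols := keyword.toList.length
  let originalLen := 64
  let numRows := (originalLen + cols - 1) / cols
  let ranks := keywordOrder keyword.toList
  let order := PySem.List.sorted2 (List.range cols) (fun i => ranks.getD i 0) (fun i => i) false
  -- scatter: walking the columns in rank order, the running counter ptr is the ciphertext
  -- index whose character belongs to plaintext position p = r*cols + c
  let srcPtr : List Nat × Nat :=
    order.foldl (fun st c =>
      (List.range numRows).foldl (fun st r =>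
        let p := r * cols + c
        if p < originalLen then (st.1.set p st.2, st.2 + 1) else st) st)
      (List.replicate originalLen 0, 0)
  -- gather: plain = ''.join(ciphertext[i] for i in src if i < len(ciphertext))
  let out : List Char :=
    srcPtr.1.foldl (fun acc i => if i < ct.length then acc ++ [ct.getD i pvNul] else acc) []
  String.ofList out

-- ===== PRECONDITION & SPEC =====
-- Pre_ excludes exactly the inputs on which the Python A raises ValueError: an empty keyword, and a
-- ciphertext shorter than the 64 reconstructed characters (the final length check then fails).
def Pre_myszkowski_decrypt (ciphertext : String) (keyword : String) : Prop :=
  keyword ≠ "" ∧ 64 ≤ ciphertext.toList.length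
instance (ciphertext : String) (keyword : String) : Decidable (Pre_myszkowski_decrypt ciphertext keyword) := by unfold Pre_myszkowski_decrypt; infer_instance

def pvWitness_myszkowski_decrypt : String × String :=
  ("0123456789abcdef0123456789abcdef0123456789abcdef0123456789abcdef", "BALLOON")

def Spec_myszkowski_decrypt (ciphertext : String) (keyword : String) (out : String) : Prop := out = myszkowski_decrypt_alt ciphertext keyword
instance (ciphertext : String) (keyword : String) (out : String) : Decidable (Spec_myszkowski_decrypt ciphertext keyword out) := by unfold Spec_myszkowski_decrypt; infer_instance

-- ===== CLAIM (what is proved, stated in full; the proofs are below) =====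
def Claim_equal_myszkowski_decrypt : Prop := ∀ (ciphertext : String) (keyword : String), Dom_myszkowski_decrypt ciphertext keyword → Pre_myszkowski_decrypt ciphertext keyword → Spec_myszkowski_decrypt ciphertext keyword (myszkowski_decrypt ciphertext keyword)

-- ===== LEMMAS AND PROOFS =====

-- proof-side names for the pieces the two ports are built from
def pvRows (cols : Nat) : Nat := (64 + cols - 1) / cols

-- column c's exact character count in the encryption grid (function form of A's dict)
def pvN (cols c : Nat) : Nat :=
  if 64 ≤ (pvRows cols - 1) * cols + c then pvRows cols - 1 else pvRows cols

-- ghost: starting offset of column c inside the ciphertext = prefix sum of n over the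
-- columns read before c
def pvOff (n : Nat → Nat) : List Nat → Nat → Nat → Nat
  | [], p, _ => p
  | x :: t, p, c => if c = x then p else pvOff n t (p + n x) c

def pvLenD (cols : Nat) : PySem.Dict Nat Nat :=
  (List.range cols).foldl (fun d c =>
    d.insert c (if 64 ≤ (pvRows cols - 1) * cols + c then pvRows cols - 1 else pvRows cols))
    PySem.Dict.empty

def pvParts (ct : List Char) (cols : Nat) (order : List Nat) : PySem.Dict Nat (List Char) :=
  (order.foldl (fun st c =>
    (st.1.insert c (PySem.List.slice ct (some (st.2 : Int))
        (some ((st.2 : Int) + ((pvLenD cols).getD c 0 : Int)))),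
     st.2 + (pvLenD cols).getD c 0)) (PySem.Dict.empty, 0)).1

def pvGrid (ct : List Char) (cols : Nat) (order : List Nat) : List (List Char) :=
  (List.range cols).foldl (fun g c =>
    (List.range ((pvParts ct cols order).getD c []).length).foldl (fun g r =>
      g.set r ((g.getD r []).set c (((pvParts ct cols order).getD c []).getD r pvNul))) g)
    (List.replicate (pvRows cols) (List.replicate cols pvNul))

def pvBodyA (ct : List Char) (cols : Nat) (order : List Nat) : List Char :=
  (List.range (pvRows cols)).foldl (fun acc r =>
    (List.range cols).foldl (fun acc c =>
      if ((pvGrid ct cols order).getD r []).getD c pvNul ≠ pvNul ∧ acc.length < 64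
      then acc ++ [((pvGrid ct cols order).getD r []).getD c pvNul] else acc) acc)
    []

def pvSrc (cols : Nat) (order : List Nat) : List Nat :=
  (order.foldl (fun st c =>
    (List.range (pvRows cols)).foldl (fun st r =>
      if r * cols + c < 64 then (st.1.set (r * cols + c) st.2, st.2 + 1) else st) st)
    (List.replicate 64 (0 : Nat), 0)).1

def pvBodyB (ct : List Char) (cols : Nat) (order : List Nat) : List Char :=
  (pvSrc cols order).foldl (fun acc i =>
    if i < ct.length then acc ++ [ct.getD i pvNul] else acc) []

-- both ports are their bodies (definitional)
theorem pv_portA_eq (ciphertext keyword : String) :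
    myszkowski_decrypt ciphertext keyword
      = String.ofList (pvBodyA ciphertext.toList keyword.toList.length
          (PySem.List.sorted2 (List.range keyword.toList.length)
            (fun i => (keywordOrder keyword.toList).getD i 0) (fun i => i) false)) := rfl

theorem pv_portB_eq (ciphertext keyword : String) :
    myszkowski_decrypt_alt ciphertext keyword
      = String.ofList (pvBodyB ciphertext.toList keyword.toList.length
          (PySem.List.sorted2 (List.range keyword.toList.length)
            (fun i => (keywordOrder keyword.toList).getD i 0) (fun i => i) false)) := rfl

-- the dict built by `for c in range(m): d[c] = f(c)` looks up as f
theorem pv_getD_fold_insert_range {ν : Type} (m : Nat) (f : Nat → ν) (d0 : ν) (c : Nat) (hc : c < m) :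
    (((List.range m).foldl (fun d c => d.insert c (f c)) PySem.Dict.empty).getD c d0) = f c := by
  have hitems := PySem.Dict.items_foldl_insert_fresh (List.range m) (fun c => c) f PySem.Dict.empty
    (fun a _ => PySem.Dict.contains_empty a) (by simpa using List.nodup_range)
  apply PySem.Dict.getD_of_mem_items
  · rw [hitems]
    exact List.mem_append_right _ (List.mem_map.mpr ⟨c, List.mem_range.mpr hc, rfl⟩)
  · exact PySem.Dict.nodup_keys_foldl_insert _ _ _ PySem.Dict.nodup_keys_empty

-- a dict/state pair fold does not change lookups at keys it never inserts
theorem pv_get?_pairfold_not_mem {ν σ : Type} (v : σ → Nat → ν) (next : σ → Nat → σ)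
    (l : List Nat) (d : PySem.Dict Nat ν) (s : σ) (c : Nat) (hc : c ∉ l) :
    (l.foldl (fun st x => (st.1.insert x (v st.2 x), next st.2 x)) (d, s)).1.get? c = d.get? c := by
  induction l generalizing d s with
  | nil => rfl
  | cons x t ih =>
    simp only [List.foldl_cons]
    rw [ih _ _ (fun h => hc (List.mem_cons_of_mem _ h))]
    exact PySem.Dict.get?_insert_of_ne d _ (fun h => hc (h ▸ List.mem_cons_self))

-- A's parts loop produces, at each column c, the slice of the ciphertext starting at pvOff
theorem pv_parts_getD (ct : List Char) (n : Nat → Nat)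
    (l : List Nat) (hnd : l.Nodup) (dA : PySem.Dict Nat (List Char)) (p0 : Nat)
    (c : Nat) (hc : c ∈ l) :
    (l.foldl (fun st x =>
        (st.1.insert x (PySem.List.slice ct (some (st.2 : Int)) (some ((st.2 : Int) + (n x : Int)))),
         st.2 + n x)) (dA, p0)).1.getD c []
      = (ct.drop (pvOff n l p0 c)).take (n c) := by
  induction l generalizing dA p0 with
  | nil => cases hc
  | cons x t ih =>
    rcases List.nodup_cons.mp hnd with ⟨hx, hndt⟩
    simp only [List.foldl_cons]
    by_cases hcx : c = x
    · subst hcx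
      have hA := pv_get?_pairfold_not_mem
        (fun (s : Nat) (x : Nat) => PySem.List.slice ct (some (s : Int)) (some ((s : Int) + (n x : Int))))
        (fun s x => s + n x) t
        (dA.insert c (PySem.List.slice ct (some (p0 : Int)) (some ((p0 : Int) + (n c : Int)))))
        (p0 + n c) c hx
      rw [PySem.Dict.getD_eq_get?_getD, hA, PySem.Dict.get?_insert_self]
      show PySem.List.slice ct (some (p0 : Int)) (some ((p0 : Int) + (n c : Int)))
        = (ct.drop (pvOff n (c :: t) p0 c)).take (n c)
      rw [PySem.List.slice_natCast_add]
      simp [pvOff]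
    · rw [ih hndt _ _ ((List.mem_cons.mp hc).resolve_left hcx)]
      simp [pvOff, hcx]

-- pvOff at a member stays below the total of the column lengths
theorem pv_off_le (n : Nat → Nat) (l : List Nat) (p0 c : Nat) (hc : c ∈ l) :
    pvOff n l p0 c + n c ≤ p0 + (l.map n).sum := by
  induction l generalizing p0 with
  | nil => cases hc
  | cons x t ih =>
    simp only [pvOff, List.map_cons, List.sum_cons]
    by_cases hcx : c = x
    · subst hcx; rw [if_pos rfl]; omega
    · rw [if_neg hcx]
      have := ih (p0 + n x) ((List.mem_cons.mp hc).resolve_left hcx)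
      omega

-- sum of a 0/1 indicator over range m
theorem pv_sum_indicator (k m : Nat) :
    ((List.range m).map (fun c => if c < k then 1 else 0)).sum = min k m := by
  induction m with
  | zero => simp
  | succ j ih =>
    rw [List.range_succ, List.map_append, List.sum_append, ih]
    by_cases h : j < k
    · simp [h]; omega
    · simp [h]; omega

-- the encryption-grid geometry: rows*cols covers 64, the last full row does not
theorem pv_rows_bounds (cols : Nat) (hcols : 0 < cols) :
    (pvRows cols - 1) * cols ≤ 63 ∧ 64 ≤ pvRows cols * cols ∧ 0 < pvRows cols := by
  have hdm := Nat.div_add_mod (63 + cols) cols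
  have hmd := Nat.mod_lt (63 + cols) hcols
  have hrows_eq : pvRows cols = (63 + cols) / cols := by unfold pvRows; congr 1; omega
  have hmul : pvRows cols * cols = cols * ((63 + cols) / cols) := by
    rw [hrows_eq, Nat.mul_comm]
  have h64 : 64 ≤ pvRows cols * cols := by rw [hmul]; omega
  have hpos : 0 < pvRows cols := by
    rcases Nat.eq_zero_or_pos (pvRows cols) with h | h
    · rw [h, Nat.zero_mul] at h64; omega
    · exact h
  refine ⟨?_, h64, hpos⟩
  have hsub : (pvRows cols - 1) * cols = pvRows cols * cols - cols := by
    rw [Nat.sub_mul, one_mul]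
  rw [hsub, hmul]
  omega

-- the column lengths sum to 64
theorem pv_sum_n (cols : Nat) (hcols : 0 < cols) :
    ((List.range cols).map (pvN cols)).sum = 64 := by
  obtain ⟨h63, h64, hpos⟩ := pv_rows_bounds cols hcols
  set R := pvRows cols with hR
  have hk : 64 - (R - 1) * cols ≤ cols := by
    have hsub : (R - 1) * cols = R * cols - cols := by rw [Nat.sub_mul, one_mul]
    have hge : cols ≤ R * cols := Nat.le_mul_of_pos_left cols hpos
    omega
  have hpt : ∀ c ∈ List.range cols, pvN cols c = (R - 1) + (if c < 64 - (R - 1) * cols then 1 else 0) := by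
    intro c _
    unfold pvN
    rw [← hR]
    split_ifs with h1 h2 h2 <;> omega
  rw [List.map_congr_left hpt]
  have hsplit : ((List.range cols).map (fun c => (R - 1) + (if c < 64 - (R - 1) * cols then 1 else 0))).sum
      = ((List.range cols).map (fun _ => R - 1)).sum
        + ((List.range cols).map (fun c => if c < 64 - (R - 1) * cols then 1 else 0)).sum := by
    induction (List.range cols) with
    | nil => simp
    | cons x t iht => simp [iht]; omega
  rw [hsplit, pv_sum_indicator]
  have hconst : ((List.range cols).map (fun _ => R - 1)).sum = cols * (R - 1) := by
    rw [List.map_const', List.sum_replicate, List.length_range, smul_eq_mul]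
  rw [hconst, Nat.min_eq_left hk]
  have hcm : cols * (R - 1) = (R - 1) * cols := Nat.mul_comm _ _
  omega

-- p < 64 ⟺ row p/cols is a real (non-padding) row of column p%cols
theorem pv_geom (cols : Nat) (hcols : 0 < cols) (p : Nat) (hp : p < pvRows cols * cols) :
    p < 64 ↔ p / cols < pvN cols (p % cols) := by
  obtain ⟨h63, h64, hpos⟩ := pv_rows_bounds cols hcols
  have hdm := Nat.div_add_mod p cols
  have hmod := Nat.mod_lt p hcols
  have hrlt : p / cols < pvRows cols := by
    rw [Nat.div_lt_iff_lt_mul hcols]; exact hp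
  unfold pvN
  split_ifs with h
  · constructor
    · intro h64p
      by_contra hge
      have hre : p / cols = pvRows cols - 1 := by omega
      rw [hre] at hdm
      have : cols * (pvRows cols - 1) = (pvRows cols - 1) * cols := Nat.mul_comm _ _
      omega
    · intro hr
      have h1 : p / cols + 1 ≤ pvRows cols - 1 := hr
      have h2 : cols * (p / cols) + cols ≤ cols * (pvRows cols - 1) := by
        calc cols * (p / cols) + cols = cols * (p / cols + 1) := by ring
        _ ≤ cols * (pvRows cols - 1) := Nat.mul_le_mul_left _ h1
      have : cols * (pvRows cols - 1) = (pvRows cols - 1) * cols := Nat.mul_comm _ _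
      omega
  · have hple : p < 64 := by
      have h2 : cols * (p / cols) ≤ cols * (pvRows cols - 1) := Nat.mul_le_mul_left _ (by omega)
      have : cols * (pvRows cols - 1) = (pvRows cols - 1) * cols := Nat.mul_comm _ _
      omega
    constructor
    · intro _; exact hrlt
    · intro _; exact hple

-- reading a slice back: exact length and cells
theorem pv_slice_len (ct : List Char) (o n : Nat) (hle : o + n ≤ ct.length) :
    ((ct.drop o).take n).length = n := by
  rw [List.length_take, List.length_drop]; omega

theorem pv_slice_getD (ct : List Char) (o n r : Nat) (hr : r < n) (hle : o + n ≤ ct.length) :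
    ((ct.drop o).take n).getD r pvNul = ct.getD (o + r) pvNul := by
  have h1 : r < ((ct.drop o).take n).length := by rw [pv_slice_len ct o n hle]; exact hr
  have h2 : o + r < ct.length := by omega
  rw [List.getD_eq_getElem _ _ h1, List.getD_eq_getElem _ _ h2]
  rw [List.getElem_take, List.getElem_drop]

-- filling one column c with the characters ch rewrites exactly the first ch.length rows at column c
theorem pv_fill_one (c : Nat) (ch : List Char) (m : Nat) (g : List (List Char)) (hm : m ≤ g.length) :
    ((List.range m).foldl (fun g r => g.set r ((g.getD r []).set c (ch.getD r pvNul))) g).length = g.length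
    ∧ ∀ r, ((List.range m).foldl (fun g r => g.set r ((g.getD r []).set c (ch.getD r pvNul))) g).getD r []
        = if r < m then (g.getD r []).set c (ch.getD r pvNul) else g.getD r [] := by
  induction m with
  | zero => simp
  | succ k ih =>
    obtain ⟨ihl, ihv⟩ := ih (Nat.le_of_succ_le hm)
    rw [List.range_succ, List.foldl_append]
    simp only [List.foldl_cons, List.foldl_nil]
    set G := (List.range k).foldl (fun g r => g.set r ((g.getD r []).set c (ch.getD r pvNul))) g with hG
    have hkG : k < G.length := by rw [ihl]; omega
    constructor
    · simp [ihl]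
    · intro r
      have hGk : G.getD k [] = g.getD k [] := by rw [ihv k]; simp
      by_cases hr : r = k
      · subst hr
        rw [List.getD_eq_getElem _ _ (by simpa using hkG), List.getElem_set, if_pos rfl, hGk,
          if_pos (Nat.lt_succ_self _)]
      · have : (G.set k ((G.getD k []).set c (ch.getD k pvNul))).getD r [] = G.getD r [] := by
          rcases Nat.lt_or_ge r (G.length) with hlt | hge
          · rw [List.getD_eq_getElem _ _ (by simpa using hlt), List.getElem_set,
              if_neg (fun hh => hr hh.symm), List.getD_eq_getElem _ _ hlt]
          · rw [List.getD_eq_default _ _ (by simpa using hge), List.getD_eq_default _ _ hge]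
        rw [this, ihv r]
        rcases Nat.lt_trichotomy r k with h1 | h1 | h1
        · rw [if_pos h1, if_pos (by omega)]
        · exact absurd h1 hr
        · rw [if_neg (by omega), if_neg (by omega)]

-- list update at one position, read back anywhere (any element type)
theorem pv_set_getD {α : Type} (dflt : α) (row : List α) (i j : Nat) (v : α) :
    (row.set i v).getD j dflt = if j = i ∧ i < row.length then v else row.getD j dflt := by
  rcases Nat.lt_or_ge i row.length with hi | hi
  · rcases eq_or_ne j i with rfl | hne
    · rw [List.getD_eq_getElem _ _ (by simpa using hi), List.getElem_set, if_pos rfl,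
        if_pos ⟨rfl, hi⟩]
    · rw [if_neg (fun h => hne h.1)]
      rcases Nat.lt_or_ge j row.length with hj | hj
      · rw [List.getD_eq_getElem _ _ (by simpa using hj), List.getElem_set,
          if_neg (fun h => hne h.symm), List.getD_eq_getElem _ _ hj]
      · rw [List.getD_eq_default _ _ (by simpa using hj), List.getD_eq_default _ _ hj]
  · rw [List.set_eq_of_length_le hi, if_neg (fun h => absurd h.2 (Nat.not_lt.mpr hi))]

-- cell values of the grid after filling the columns listed in l
theorem pv_grid_cells (P : Nat → List Char) (rows cols : Nat)
    (l : List Nat) (hsub : ∀ c ∈ l, c < cols) (hlen : ∀ c ∈ l, (P c).length ≤ rows)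
    (g : List (List Char)) (hg : g.length = rows) (hrow : ∀ r, r < rows → (g.getD r []).length = cols) :
    ((l.foldl (fun g c => (List.range (P c).length).foldl (fun g r =>
        g.set r ((g.getD r []).set c ((P c).getD r pvNul))) g) g).length = rows
    ∧ (∀ r, r < rows → ((l.foldl (fun g c => (List.range (P c).length).foldl (fun g r =>
        g.set r ((g.getD r []).set c ((P c).getD r pvNul))) g) g).getD r []).length = cols))
    ∧ ∀ r c', (((l.foldl (fun g c => (List.range (P c).length).foldl (fun g r =>
        g.set r ((g.getD r []).set c ((P c).getD r pvNul))) g) g).getD r []).getD c' pvNul)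
        = if c' ∈ l ∧ r < (P c').length then (P c').getD r pvNul
          else (g.getD r []).getD c' pvNul := by
  induction l generalizing g with
  | nil => exact ⟨⟨hg, hrow⟩, fun r c' => by simp⟩
  | cons x t ih =>
    have hxcols : x < cols := hsub x List.mem_cons_self
    have hxrows : (P x).length ≤ rows := hlen x List.mem_cons_self
    obtain ⟨hl1, hv1⟩ := pv_fill_one x (P x) (P x).length g (by omega)
    simp only [List.foldl_cons]
    set g' := (List.range (P x).length).foldl (fun g r =>
        g.set r ((g.getD r []).set x ((P x).getD r pvNul))) g with hg'
    have hg'len : g'.length = rows := by rw [hl1, hg]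
    have hg'row : ∀ r, r < rows → (g'.getD r []).length = cols := by
      intro r hr
      rw [hv1 r]
      split_ifs
      · rw [List.length_set]; exact hrow r hr
      · exact hrow r hr
    obtain ⟨hlens, hcells⟩ := ih (fun c hc => hsub c (List.mem_cons_of_mem _ hc))
      (fun c hc => hlen c (List.mem_cons_of_mem _ hc)) g' hg'len hg'row
    refine ⟨hlens, fun r c' => ?_⟩
    rw [hcells r c']
    by_cases ht : c' ∈ t ∧ r < (P c').length
    · rw [if_pos ht, if_pos ⟨List.mem_cons_of_mem _ ht.1, ht.2⟩]
    · rw [if_neg ht, hv1 r]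
      by_cases hrx : r < (P x).length
      · rw [if_pos hrx, pv_set_getD]
        by_cases hcx : c' = x
        · subst hcx
          have hrlen : c' < (g.getD r []).length := by
            rw [hrow r (by omega)]; exact hxcols
          rw [if_pos ⟨rfl, hrlen⟩, if_pos ⟨List.mem_cons_self, hrx⟩]
        · rw [if_neg (fun h => hcx h.1),
            if_neg (fun h => ht ⟨(List.mem_cons.mp h.1).resolve_left hcx, h.2⟩)]
      · rw [if_neg hrx]
        by_cases hcx : c' = x
        · subst hcx
          rw [if_neg (fun h => hrx h.2)]
        · rw [if_neg (fun h => ht ⟨(List.mem_cons.mp h.1).resolve_left hcx, h.2⟩)]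

-- a row-by-row, column-by-column double fold is one fold over the flattened cell indices
theorem pv_foldl_range_mul {α : Type} (n m : Nat) (h : α → Nat → Nat → α) (init : α) :
    (List.range n).foldl (fun a r => (List.range m).foldl (fun a c => h a r c) a) init
      = (List.range (n * m)).foldl (fun a p => h a (p / m) (p % m)) init := by
  induction n with
  | zero => simp
  | succ k ih =>
    have hsplit : List.range ((k + 1) * m) = List.range (k * m) ++ (List.range m).map (fun x => k * m + x) := by
      rw [Nat.succ_mul]; exact List.range_add
    rw [List.range_succ, List.foldl_append, ih, hsplit, List.foldl_append, List.foldl_map]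
    simp only [List.foldl_cons, List.foldl_nil]
    apply PySem.List.foldl_congr_mem
    intro acc x hx
    have hxm : x < m := List.mem_range.mp hx
    have hm : 0 < m := Nat.lt_of_le_of_lt (Nat.zero_le x) hxm
    have h1 : (k * m + x) / m = k := by
      rw [Nat.mul_comm k m, Nat.mul_add_div hm, Nat.div_eq_of_lt hxm, Nat.add_zero]
    have h2 : (k * m + x) % m = x := by
      rw [Nat.mul_comm k m, Nat.mul_add_mod, Nat.mod_eq_of_lt hxm]
    rw [h1, h2]

-- a fold whose step is the identity on every list element is the identity
theorem pv_foldl_id {α β : Type} (l : List β) (f : α → β → α) (init : α)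
    (h : ∀ a, ∀ x ∈ l, f a x = a) : l.foldl f init = init := by
  induction l generalizing init with
  | nil => rfl
  | cons x t ih =>
    simp only [List.foldl_cons]
    rw [h init x (by simp)]
    exact ih init (fun a y hy => h a y (by simp [hy]))

-- A's skip-and-cap append loop appends everything when no cell is padding and there is room
theorem pv_foldl_cap (g : Nat → Char) (l : List Nat) (acc : List Char)
    (hall : ∀ p ∈ l, g p ≠ pvNul) (hlen : acc.length + l.length ≤ 64) :
    l.foldl (fun acc p => if g p ≠ pvNul ∧ acc.length < 64 then acc ++ [g p] else acc) acc
      = acc ++ l.map g := by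
  induction l generalizing acc with
  | nil => simp
  | cons x t ih =>
    have hlen' : acc.length + t.length + 1 ≤ 64 := by simpa using hlen
    simp only [List.foldl_cons]
    rw [if_pos ⟨hall x List.mem_cons_self, by omega⟩]
    rw [ih (acc ++ [g x]) (fun p hp => hall p (List.mem_cons_of_mem _ hp))
      (by simp only [List.length_append, List.length_cons, List.length_nil]; omega)]
    simp

-- the scatter inner loop over one column c: assigns ptr, ptr+1, … to positions r*cols+c < 64
theorem pv_inner_aux (cols : Nat) (hcols : 0 < cols) (c : Nat) (hc : c < cols)
    (src : List Nat) (hlen : src.length = 64) (ptr : Nat) (m : Nat) (hm : m ≤ pvRows cols) :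
    ((List.range m).foldl (fun st r =>
        if r * cols + c < 64 then (st.1.set (r * cols + c) st.2, st.2 + 1) else st)
      (src, ptr)).1.length = 64
    ∧ ((List.range m).foldl (fun st r =>
        if r * cols + c < 64 then (st.1.set (r * cols + c) st.2, st.2 + 1) else st)
      (src, ptr)).2 = ptr + min m (pvN cols c)
    ∧ ∀ q, ((List.range m).foldl (fun st r =>
        if r * cols + c < 64 then (st.1.set (r * cols + c) st.2, st.2 + 1) else st)
      (src, ptr)).1.getD q 0
        = if q % cols = c ∧ q < 64 ∧ q / cols < m then ptr + q / cols else src.getD q 0 := by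
  obtain ⟨h63, h64, hpos⟩ := pv_rows_bounds cols hcols
  induction m with
  | zero => exact ⟨by simpa using hlen, by simp, fun q => by simp⟩
  | succ k ihm =>
    obtain ⟨ih1, ih2, ih3⟩ := ihm (by omega)
    rw [List.range_succ, List.foldl_append]
    simp only [List.foldl_cons, List.foldl_nil]
    set ST := (List.range k).foldl (fun st r =>
        if r * cols + c < 64 then (st.1.set (r * cols + c) st.2, st.2 + 1) else st)
      (src, ptr) with hST
    have hpk : (k * cols + c) % cols = c ∧ (k * cols + c) / cols = k := by
      constructor
      · rw [Nat.add_comm, Nat.add_mul_mod_self_right, Nat.mod_eq_of_lt hc]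
      · rw [Nat.add_comm, Nat.add_mul_div_right _ _ hcols, Nat.div_eq_of_lt hc]
        omega
    have hkrows : k < pvRows cols := by omega
    have hplt : k * cols + c < pvRows cols * cols := by
      calc k * cols + c < k * cols + cols := by omega
      _ = (k + 1) * cols := by ring
      _ ≤ pvRows cols * cols := Nat.mul_le_mul_right _ (by omega)
    have hgeom : k * cols + c < 64 ↔ k < pvN cols c := by
      have := pv_geom cols hcols (k * cols + c) hplt
      rw [hpk.1, hpk.2] at this
      exact this
    by_cases hcase : k * cols + c < 64
    · have hklt : k < pvN cols c := hgeom.mp hcase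
      rw [if_pos hcase]
      refine ⟨?_, ?_, fun q => ?_⟩
      · show (ST.1.set (k * cols + c) ST.2).length = 64
        rw [List.length_set]; exact ih1
      · show ST.2 + 1 = ptr + min (k + 1) (pvN cols c)
        rw [ih2]; omega
      · show (ST.1.set (k * cols + c) ST.2).getD q 0
          = if q % cols = c ∧ q < 64 ∧ q / cols < k + 1 then ptr + q / cols else src.getD q 0
        rw [pv_set_getD, ih1, ih2, ih3 q]
        by_cases hq : q = k * cols + c
        · subst hq
          rw [if_pos ⟨rfl, hcase⟩, if_pos ⟨hpk.1, hcase, by rw [hpk.2]; omega⟩, hpk.2]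
          omega
        · rw [if_neg (fun h => hq h.1)]
          by_cases hcond : q % cols = c ∧ q < 64 ∧ q / cols < k
          · rw [if_pos hcond, if_pos ⟨hcond.1, hcond.2.1, by omega⟩]
          · rw [if_neg hcond]
            rw [if_neg (fun h => ?_)]
            obtain ⟨hq1, hq2, hq3⟩ := h
            have hqk : q / cols = k := by
              by_contra hne
              exact hcond ⟨hq1, hq2, by omega⟩
            apply hq
            have hdmq := Nat.div_add_mod q cols
            rw [hqk, hq1] at hdmq
            have hcm : cols * k = k * cols := Nat.mul_comm cols k
            omega
    · have hkge : pvN cols c ≤ k := by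
        by_contra h
        exact hcase (hgeom.mpr (by omega))
      rw [if_neg hcase]
      refine ⟨ih1, by rw [ih2]; omega, fun q => ?_⟩
      rw [ih3 q]
      by_cases hcond : q % cols = c ∧ q < 64 ∧ q / cols < k
      · rw [if_pos hcond, if_pos ⟨hcond.1, hcond.2.1, by omega⟩]
      · rw [if_neg hcond]
        rw [if_neg (fun h => ?_)]
        obtain ⟨hq1, hq2, hq3⟩ := h
        have hqn : q / cols < pvN cols c := by
          have h := (pv_geom cols hcols q (by omega)).mp hq2
          rw [hq1] at h
          exact h
        exact hcond ⟨hq1, hq2, by omega⟩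
  
-- the whole scatter: src[q] = pvOff(q%cols) + q/cols for the columns already processed
theorem pv_scatter (cols : Nat) (hcols : 0 < cols) (l : List Nat)
    (hsub : ∀ c ∈ l, c < cols) (hnd : l.Nodup) (src : List Nat) (hlen : src.length = 64) (ptr : Nat) :
    ((l.foldl (fun st c =>
        (List.range (pvRows cols)).foldl (fun st r =>
          if r * cols + c < 64 then (st.1.set (r * cols + c) st.2, st.2 + 1) else st) st)
      (src, ptr)).1.length = 64)
    ∧ ∀ q, (l.foldl (fun st c =>
        (List.range (pvRows cols)).foldl (fun st r =>
          if r * cols + c < 64 then (st.1.set (r * cols + c) st.2, st.2 + 1) else st) st)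
      (src, ptr)).1.getD q 0
        = if q < 64 ∧ q % cols ∈ l then pvOff (pvN cols) l ptr (q % cols) + q / cols
          else src.getD q 0 := by
  obtain ⟨h63, h64, hpos⟩ := pv_rows_bounds cols hcols
  induction l generalizing src ptr with
  | nil => exact ⟨hlen, fun q => by simp⟩
  | cons x t ih =>
    rcases List.nodup_cons.mp hnd with ⟨hx, hndt⟩
    have hxcols : x < cols := hsub x List.mem_cons_self
    obtain ⟨h1, h2, h3⟩ := pv_inner_aux cols hcols x hxcols src hlen ptr (pvRows cols) (le_refl _)
    simp only [List.foldl_cons]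
    have hNle : pvN cols x ≤ pvRows cols := by unfold pvN; split <;> omega
    have h2' : ((List.range (pvRows cols)).foldl (fun st r =>
        if r * cols + x < 64 then (st.1.set (r * cols + x) st.2, st.2 + 1) else st)
      (src, ptr)).2 = ptr + pvN cols x := by rw [h2]; congr 1; omega
    set ST := (List.range (pvRows cols)).foldl (fun st r =>
        if r * cols + x < 64 then (st.1.set (r * cols + x) st.2, st.2 + 1) else st)
      (src, ptr) with hST
    have hSTeq : ST = (ST.1, ptr + pvN cols x) := by
      rw [← h2']
    rw [hSTeq]
    obtain ⟨ihl, ihv⟩ := ih (fun c hc => hsub c (List.mem_cons_of_mem _ hc)) hndt ST.1 h1 (ptr + pvN cols x)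
    refine ⟨ihl, fun q => ?_⟩
    rw [ihv q]
    have h3q := h3 q
    have hqrows : q < 64 → q / cols < pvRows cols := by
      intro hq
      rw [Nat.div_lt_iff_lt_mul hcols]
      omega
    by_cases hqt : q < 64 ∧ q % cols ∈ t
    · rw [if_pos hqt, if_pos ⟨hqt.1, List.mem_cons_of_mem _ hqt.2⟩]
      have hqx : ¬ (q % cols = x) := fun h => hx (h ▸ hqt.2)
      simp [pvOff, hqx]
    · rw [if_neg hqt, h3q]
      by_cases hqx : q % cols = x ∧ q < 64
      · rw [if_pos ⟨hqx.1, hqx.2, hqrows hqx.2⟩, if_pos ⟨hqx.2, by rw [hqx.1]; exact List.mem_cons_self⟩]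
        simp [pvOff, hqx.1]
      · rw [if_neg (fun h => hqx ⟨h.1, h.2.1⟩)]
        rw [if_neg (fun h => ?_)]
        rcases List.mem_cons.mp h.2 with h' | h'
        · exact hqx ⟨h', h.1⟩
        · exact hqt ⟨h.1, h'⟩

-- a printable-domain character is never the padding sentinel
theorem pv_dom_ne_nul (c : Char) (h : pvDomChar c = true) : c ≠ pvNul := by
  intro he
  subst he
  simp [pvDomChar, pvNul] at h

-- the heart of the equivalence, with the read order abstracted to any permutation of range cols
theorem pv_master (ct : List Char) (cols : Nat) (hcols : 0 < cols)
    (hct : 64 ≤ ct.length) (hdom : ∀ c ∈ ct, pvDomChar c = true)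
    (order : List Nat) (hperm : order.Perm (List.range cols)) :
    pvBodyA ct cols order = pvBodyB ct cols order := by
  obtain ⟨h63, h64, hpos⟩ := pv_rows_bounds cols hcols
  have hnd : order.Nodup := hperm.nodup_iff.mpr List.nodup_range
  have hmem : ∀ c, c ∈ order ↔ c < cols := fun c => by rw [hperm.mem_iff, List.mem_range]
  -- total of the column lengths, in any order, is 64
  have hsum : (order.map (pvN cols)).sum = 64 := by
    rw [(hperm.map (pvN cols)).sum_eq, pv_sum_n cols hcols]
  -- the offset function: every column's slice fits inside the first 64 characters
  have hoff : ∀ c, c < cols → pvOff (pvN cols) order 0 c + pvN cols c ≤ 64 := by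
    intro c hc
    have := pv_off_le (pvN cols) order 0 c ((hmem c).mpr hc)
    omega
  -- the common per-position source index
  set F : Nat → Nat := fun p => pvOff (pvN cols) order 0 (p % cols) + p / cols with hF
  have hFlt : ∀ p, p < 64 → F p < 64 := by
    intro p hp
    have hmod : p % cols < cols := Nat.mod_lt _ hcols
    have hgeom := (pv_geom cols hcols p (by omega)).mp hp
    have := hoff (p % cols) hmod
    simp only [hF]
    omega
  -- the common per-position character, never the padding sentinel
  have hgood : ∀ p, p < 64 → ct.getD (F p) pvNul ≠ pvNul := by
    intro p hp
    have hlt : F p < ct.length := by have := hFlt p hp; omega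
    apply pv_dom_ne_nul
    apply hdom
    rw [List.getD_eq_getElem _ _ hlt]
    exact List.getElem_mem _
  -- ===== A side =====
  -- A's column-length dict looks up as pvN
  have hlenD : ∀ c, c < cols → (pvLenD cols).getD c 0 = pvN cols c := by
    intro c hc
    exact pv_getD_fold_insert_range cols (pvN cols) 0 c hc
  -- A's parts loop computed at pvLenD equals the same loop computed at pvN
  have hparts_congr : pvParts ct cols order
      = (order.foldl (fun st x =>
          (st.1.insert x (PySem.List.slice ct (some (st.2 : Int)) (some ((st.2 : Int) + (pvN cols x : Int)))),
           st.2 + pvN cols x)) (PySem.Dict.empty, 0)).1 := by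
    unfold pvParts
    congr 1
    apply PySem.List.foldl_congr_mem
    intro acc x hxmem
    rw [hlenD x ((hmem x).mp hxmem)]
  have hP : ∀ c, c < cols → (pvParts ct cols order).getD c []
      = (ct.drop (pvOff (pvN cols) order 0 c)).take (pvN cols c) := by
    intro c hc
    rw [hparts_congr]
    exact pv_parts_getD ct (pvN cols) order hnd PySem.Dict.empty 0 c ((hmem c).mpr hc)
  have hPlen : ∀ c, c < cols → ((pvParts ct cols order).getD c []).length = pvN cols c := by
    intro c hc
    rw [hP c hc]
    exact pv_slice_len ct _ _ (by have := hoff c hc; omega)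
  -- grid cells after the fill loop
  obtain ⟨-, hcells⟩ := pv_grid_cells (fun c => (pvParts ct cols order).getD c [])
    (pvRows cols) cols (List.range cols) (fun c hc => List.mem_range.mp hc)
    (fun c hc => by
      rw [hPlen c (List.mem_range.mp hc)]
      unfold pvN; split <;> omega)
    (List.replicate (pvRows cols) (List.replicate cols pvNul)) (by simp)
    (by intro r hr
        rw [List.getD_eq_getElem _ _ (by simpa using hr), List.getElem_replicate,
          List.length_replicate])
  have hbase : ∀ r c', (((List.replicate (pvRows cols) (List.replicate cols pvNul)).getD r []).getD c' pvNul) = pvNul := by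
    intro r c'
    rcases Nat.lt_or_ge r (pvRows cols) with hr | hr
    · rcases Nat.lt_or_ge c' cols with hc | hc
      · simp [List.getD_eq_getElem?_getD, hr, hc]
      · simp [List.getD_eq_getElem?_getD, hr,
          show ¬ c' < cols from Nat.not_lt.mpr hc]
    · simp [List.getD_eq_getElem?_getD,
        show ¬ r < pvRows cols from Nat.not_lt.mpr hr]
  have hcell : ∀ r c', ((pvGrid ct cols order).getD r []).getD c' pvNul
      = if c' < cols ∧ r < ((pvParts ct cols order).getD c' []).length
        then ((pvParts ct cols order).getD c' []).getD r pvNul else pvNul := by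
    intro r c'
    have h := hcells r c'
    rw [hbase r c'] at h
    simpa [List.mem_range] using h
  -- the filled cell at flat position p < 64 is exactly ct[F p]
  have hcellF : ∀ p, p < 64 → ((pvGrid ct cols order).getD (p / cols) []).getD (p % cols) pvNul
      = ct.getD (F p) pvNul := by
    intro p hp
    have hmod : p % cols < cols := Nat.mod_lt _ hcols
    have hgeom := (pv_geom cols hcols p (by omega)).mp hp
    rw [hcell, if_pos ⟨hmod, by rw [hPlen _ hmod]; exact hgeom⟩, hP _ hmod]
    exact pv_slice_getD ct _ _ _ hgeom (by have := hoff _ hmod; omega)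
  -- flatten A's double loop, split off the 64 real cells, drop the all-'\0' tail
  unfold pvBodyA
  rw [pv_foldl_range_mul (pvRows cols) cols
    (fun acc r c => if ((pvGrid ct cols order).getD r []).getD c pvNul ≠ pvNul ∧ acc.length < 64
      then acc ++ [((pvGrid ct cols order).getD r []).getD c pvNul] else acc) []]
  rw [show pvRows cols * cols = 64 + (pvRows cols * cols - 64) from by omega]
  rw [List.range_add, List.foldl_append, List.foldl_map]
  have hid : ∀ (a : List Char), ∀ x ∈ List.range (pvRows cols * cols - 64),
      (if ((pvGrid ct cols order).getD ((64 + x) / cols) []).getD ((64 + x) % cols) pvNul ≠ pvNul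
          ∧ a.length < 64
       then a ++ [((pvGrid ct cols order).getD ((64 + x) / cols) []).getD ((64 + x) % cols) pvNul]
       else a) = a := by
    intro a x hx
    have hxlt : x < pvRows cols * cols - 64 := List.mem_range.mp hx
    have hmodlt : (64 + x) % cols < cols := Nat.mod_lt _ hcols
    have hnolt : ¬ ((64 + x) / cols < ((pvParts ct cols order).getD ((64 + x) % cols) []).length) := by
      rw [hPlen _ hmodlt]
      intro hcontra
      have := (pv_geom cols hcols (64 + x) (by omega)).mpr hcontra
      omega
    rw [hcell]
    rw [if_neg (show ¬ (((64 + x) % cols < cols)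
        ∧ (64 + x) / cols < ((pvParts ct cols order).getD ((64 + x) % cols) []).length)
      from fun hh => hnolt hh.2)]
    simp
  rw [pv_foldl_id _ _ _ hid]
  -- the first-64 fold appends every cell: it is the map over positions
  have hA : (List.range 64).foldl
      (fun acc p => if ((pvGrid ct cols order).getD (p / cols) []).getD (p % cols) pvNul ≠ pvNul
          ∧ acc.length < 64
        then acc ++ [((pvGrid ct cols order).getD (p / cols) []).getD (p % cols) pvNul] else acc) []
      = (List.range 64).map (fun p => ct.getD (F p) pvNul) := by
    have hstep : (List.range 64).foldl
        (fun acc p => if ((pvGrid ct cols order).getD (p / cols) []).getD (p % cols) pvNul ≠ pvNul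
            ∧ acc.length < 64
          then acc ++ [((pvGrid ct cols order).getD (p / cols) []).getD (p % cols) pvNul] else acc) []
        = (List.range 64).foldl
        (fun acc p => if ct.getD (F p) pvNul ≠ pvNul ∧ acc.length < 64
          then acc ++ [ct.getD (F p) pvNul] else acc) [] := by
      apply PySem.List.foldl_congr_mem
      intro acc p hp
      rw [hcellF p (List.mem_range.mp hp)]
    rw [hstep, pv_foldl_cap (fun p => ct.getD (F p) pvNul) (List.range 64) []
      (fun p hp => hgood p (List.mem_range.mp hp)) (by simp)]
    simp
  rw [hA]
  -- ===== B side =====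
  obtain ⟨hsl, hsv⟩ := pv_scatter cols hcols order (fun c hc => (hmem c).mp hc) hnd
    (List.replicate 64 0) (by simp) 0
  have hsrc : pvSrc cols order = (List.range 64).map F := by
    apply List.ext_getElem
    · unfold pvSrc; rw [hsl]; simp
    · intro i h1 h2
      have hi : i < 64 := by simpa using h2
      have hgd : (pvSrc cols order).getD i 0 = (pvSrc cols order)[i] :=
        List.getD_eq_getElem _ _ h1
      rw [← hgd]
      unfold pvSrc
      rw [hsv i, if_pos ⟨hi, (hmem _).mpr (Nat.mod_lt _ hcols)⟩]
      simp [hF]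
  unfold pvBodyB
  rw [hsrc, List.foldl_map]
  have hBstep : ∀ (acc : List Char), ∀ p ∈ List.range 64,
      (if F p < ct.length then acc ++ [ct.getD (F p) pvNul] else acc)
        = acc ++ [ct.getD (F p) pvNul] := by
    intro acc p hp
    rw [if_pos (by have := hFlt p (List.mem_range.mp hp); omega)]
  have hB2 : (List.range 64).foldl
      (fun acc p => if F p < ct.length then acc ++ [ct.getD (F p) pvNul] else acc) []
      = (List.range 64).foldl (fun acc p => acc ++ [ct.getD (F p) pvNul]) [] :=
    PySem.List.foldl_congr_mem _ _ _ _ hBstep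
  rw [hB2, PySem.List.foldl_append_singleton_eq_map]
  simp

-- ===== VERDICT (by name: the statement is the Claim_ definition above) =====
theorem myszkowski_decrypt_spec : Claim_equal_myszkowski_decrypt := by
  intro ciphertext keyword hdom hpre
  unfold Spec_myszkowski_decrypt
  rw [pv_portA_eq, pv_portB_eq]
  have hk : keyword.toList ≠ [] := fun h => hpre.1 (String.toList_eq_nil_iff.mp h)
  have hcols : 0 < keyword.toList.length := List.length_pos_of_ne_nil hk
  have hdomct : ∀ c ∈ ciphertext.toList, pvDomChar c = true := by
    unfold Dom_myszkowski_decrypt pvDomStr at hdom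
    rw [Bool.and_eq_true] at hdom
    exact fun c hc => List.all_eq_true.mp hdom.1 c hc
  exact congrArg String.ofList
    (pv_master ciphertext.toList keyword.toList.length hcols hpre.2 hdomct _
      (PySem.List.sorted2_perm _ _ _ _))
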